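-- pv_equiv track=rewrite | github.com/pech2/advent-of-code | day03.py | check
-- ===== SOURCE A (Python) =====
-- def check(grid, row, col):
--     for x in range(-1, 2):
--         for y in range(-1, 2):
--             new_row = x + row
--             new_col = y + col
--             if (
--                 new_row < 0
--                 or new_row >= len(grid)
--                 or new_col < 0
--                 or new_col >= len(grid[0])
--             ):
--                 continue
--             if not grid[new_row][new_col].isdigit() and grid[new_row][new_col] != ".":
--                 return True
--     return False
-- ===== SOURCE B (Python) =====
-- def check(grid, row, col):
--     for i, r in enumerate(grid):
--         for j, c in enumerate(r):
--             if abs(i - row) <= 1 and abs(j - col) <= 1 and c != "." and not c.isdigit():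
--                 return True
--     return False
-- ===== Notes on version B (the rewrite author's own statement) =====
-- stated objective: alternative
-- what changed: Instead of probing the nine offset cells with a four-way bounds guard, B scans the whole grid with enumerate and reports a cell whose Chebyshev distance from (row, col) is at most 1 and which holds a symbol (not '.' and not a digit), so no bounds checks or index arithmetic are needed.
-- outside the precondition, e.g. on check([['.'], ['.', '*']], 0, 0): A returns False, B returns True; on check([['.', '.'], ['.']], 1, 1): A raises IndexError, B returns False
import Mathlib
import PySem

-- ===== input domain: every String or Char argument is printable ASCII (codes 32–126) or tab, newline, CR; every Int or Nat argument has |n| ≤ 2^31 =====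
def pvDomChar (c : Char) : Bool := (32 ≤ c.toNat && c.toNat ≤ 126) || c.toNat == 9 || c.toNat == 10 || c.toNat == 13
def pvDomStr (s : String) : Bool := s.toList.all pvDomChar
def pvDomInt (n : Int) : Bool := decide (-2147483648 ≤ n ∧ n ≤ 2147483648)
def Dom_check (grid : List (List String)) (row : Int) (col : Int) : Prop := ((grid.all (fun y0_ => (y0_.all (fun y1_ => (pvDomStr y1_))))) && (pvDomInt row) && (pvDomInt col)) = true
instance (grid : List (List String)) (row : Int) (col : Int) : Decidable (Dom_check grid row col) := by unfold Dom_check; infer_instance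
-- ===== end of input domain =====

-- B replaces A's guarded probing of the nine offset cells by one enumerate scan of the
-- whole grid, keeping cells at Chebyshev distance <= 1 from (row, col) (objective: alternative).


-- ===== PORT A =====
-- body of one inner-loop iteration (new_row = x + row, new_col = y + col): the four-way
-- bounds guard with `continue` (→ false), then the symbol test (→ early return True).
-- The `.getD` defaults are only reachable on ragged grids (IndexError in Python),
-- which Pre_check excludes.
def checkCell (grid : List (List String)) (nr nc : Int) : Bool :=
  if nr < 0 ∨ nr ≥ (grid.length : Int) ∨ nc < 0 ∨ nc ≥ ((grid.headD []).length : Int) then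
    false
  else
    !(PySem.Str.strIsdigit ((PySem.List.pyGet? ((PySem.List.pyGet? grid nr).getD []) nc).getD "")) &&
      ((PySem.List.pyGet? ((PySem.List.pyGet? grid nr).getD []) nc).getD "") ≠ "."

def check (grid : List (List String)) (row : Int) (col : Int) : Bool :=
  (PySem.List.pyRange (-1) 2 1).any (fun x =>
    (PySem.List.pyRange (-1) 2 1).any (fun y =>
      checkCell grid (x + row) (y + col)))

-- ===== PORT B =====
def check_alt (grid : List (List String)) (row : Int) (col : Int) : Bool :=
  (PySem.List.enumerate grid).any (fun ir =>
    (PySem.List.enumerate ir.2).any (fun jc =>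
      decide (|ir.1 - row| ≤ 1) && decide (|jc.1 - col| ≤ 1) &&
        jc.2 ≠ "." && !(PySem.Str.strIsdigit jc.2)))

-- ===== PRECONDITION & SPEC =====
-- Pre_check excludes grids where, inside the 3x3 window around (row, col), A's column
-- bound len(grid[0]) disagrees with the actual row length: there A may raise IndexError
-- on a shorter row or silently ignore the extra cells of a longer row, while B scans
-- each row against its own length.  (The bound grid[i].length + grid[0].length on j is
-- not a restriction: beyond both lengths the two sides of the iff are both false.)
def Pre_check (grid : List (List String)) (row : Int) (col : Int) : Prop :=
  ∀ (i : ℕ) (_ : i < grid.length), row - 1 ≤ (i : ℤ) → (i : ℤ) ≤ row + 1 →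
    ∀ (j : ℕ), j < grid[i].length + (grid.headD []).length →
      col - 1 ≤ (j : ℤ) → (j : ℤ) ≤ col + 1 →
      (j < (grid.headD []).length ↔ j < grid[i].length)
instance (grid : List (List String)) (row : Int) (col : Int) : Decidable (Pre_check grid row col) := by unfold Pre_check; infer_instance

def pvWitness_check : List (List String) × Int × Int := ([[".", "*"], ["1", "."]], 0, 0)

def Spec_check (grid : List (List String)) (row : Int) (col : Int) (out : Bool) : Prop := out = check_alt grid row col
instance (grid : List (List String)) (row : Int) (col : Int) (out : Bool) : Decidable (Spec_check grid row col out) := by unfold Spec_check; infer_instance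

-- ===== CLAIM (what is proved, stated in full; the proofs are below) =====
def Claim_equal_check : Prop := ∀ (grid : List (List String)) (row : Int) (col : Int), Dom_check grid row col → Pre_check grid row col → Spec_check grid row col (check grid row col)

-- ===== LEMMAS AND PROOFS =====

-- the symbol predicate both programs test
def isSym (c : String) : Bool := !(PySem.Str.strIsdigit c) && c ≠ "."

-- B characterised by indices (rows use their own lengths)
theorem check_alt_iff (grid : List (List String)) (row col : Int) :
    check_alt grid row col = true ↔
      ∃ (i : ℕ) (h : i < grid.length), row - 1 ≤ (i : ℤ) ∧ (i : ℤ) ≤ row + 1 ∧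
        ∃ (j : ℕ) (h' : j < grid[i].length), col - 1 ≤ (j : ℤ) ∧ (j : ℤ) ≤ col + 1 ∧
          isSym grid[i][j] = true := by
  unfold check_alt
  rw [List.any_eq_true]
  constructor
  · rintro ⟨ir, hmem, hr⟩
    rw [PySem.List.mem_enumerate_iff] at hmem
    obtain ⟨i, hi, rfl⟩ := hmem
    rw [List.any_eq_true] at hr
    obtain ⟨jc, hmem2, hc⟩ := hr
    rw [PySem.List.mem_enumerate_iff] at hmem2
    obtain ⟨j, hj, rfl⟩ := hmem2
    simp only [zero_add, Bool.and_eq_true, decide_eq_true_eq,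
      Bool.not_eq_true'] at hc
    obtain ⟨⟨⟨hri, hcj⟩, hdot⟩, hdig⟩ := hc
    rw [abs_le] at hri hcj
    refine ⟨i, hi, by omega, by omega, j, hj, by omega, by omega, ?_⟩
    simp only [isSym, Bool.and_eq_true, Bool.not_eq_true', decide_eq_true_eq]
    exact ⟨hdig, hdot⟩
  · rintro ⟨i, hi, h1, h2, j, hj, h3, h4, hs⟩
    refine ⟨((i : ℤ), grid[i]), ?_, ?_⟩
    · rw [PySem.List.mem_enumerate_iff]; exact ⟨i, hi, by simp⟩
    · rw [List.any_eq_true]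
      refine ⟨((j : ℤ), grid[i][j]), ?_, ?_⟩
      · rw [PySem.List.mem_enumerate_iff]; exact ⟨j, hj, by simp⟩
      · simp only [isSym, Bool.and_eq_true, Bool.not_eq_true', decide_eq_true_eq] at hs ⊢
        refine ⟨⟨⟨?_, ?_⟩, hs.2⟩, hs.1⟩
        · rw [abs_le]; constructor <;> omega
        · rw [abs_le]; constructor <;> omega

-- the inner-loop body characterised by indices (column bound = grid[0]'s length, like A)
theorem checkCell_iff (grid : List (List String)) (nr nc : Int) :
    checkCell grid nr nc = true ↔
      ∃ (i : ℕ) (h : i < grid.length), (i : ℤ) = nr ∧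
        ∃ (j : ℕ), j < (grid.headD []).length ∧ (j : ℤ) = nc ∧
          isSym ((PySem.List.pyGet? grid[i] (j : ℤ)).getD "") = true := by
  unfold checkCell
  split_ifs with hguard
  · simp only [false_iff]
    rintro ⟨i, h, hi, j, hj, hjc, _⟩
    omega
  · rw [not_or, not_or, not_or, not_lt, not_lt, not_le, not_le] at hguard
    obtain ⟨h1, h2, h3, h4⟩ := hguard
    constructor
    · intro hx
      have hfit : nr.toNat < grid.length := by omega
      refine ⟨nr.toNat, hfit, by omega, nc.toNat, by omega, by omega, ?_⟩
      have hr : PySem.List.pyGet? grid nr = some grid[nr.toNat] :=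
        PySem.List.pyGet?_eq_some_getElem grid h1 h2
      rw [hr] at hx
      simp only [Option.getD_some] at hx
      have hc : ((nc.toNat : ℤ)) = nc := by omega
      rw [hc]
      unfold isSym
      exact hx
    · rintro ⟨i, h, hi, j, hj, hjc, hx⟩
      subst hi; subst hjc
      have hr : PySem.List.pyGet? grid ((i : ℤ)) = some grid[i] :=
        PySem.List.pyGet?_ofNat grid i h
      rw [hr]
      simp only [Option.getD_some]
      unfold isSym at hx
      exact hx

-- A characterised by indices (column bound = grid[0]'s length)
theorem check_iff (grid : List (List String)) (row col : Int) :
    check grid row col = true ↔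
      ∃ (i : ℕ) (h : i < grid.length), row - 1 ≤ (i : ℤ) ∧ (i : ℤ) ≤ row + 1 ∧
        ∃ (j : ℕ), j < (grid.headD []).length ∧ col - 1 ≤ (j : ℤ) ∧ (j : ℤ) ≤ col + 1 ∧
          isSym ((PySem.List.pyGet? grid[i] (j : ℤ)).getD "") = true := by
  unfold check
  have hrange : PySem.List.pyRange (-1) 2 1 = [-1, 0, 1] := by decide
  rw [hrange]
  simp only [List.any_cons, List.any_nil, Bool.or_false, Bool.or_eq_true]
  constructor
  · intro hx
    rcases hx with ((h | h | h) | (h | h | h) | (h | h | h)) <;>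
      · rw [checkCell_iff] at h
        obtain ⟨i, hlen, hi, j, hj, hjc, hs⟩ := h
        exact ⟨i, hlen, by omega, by omega, j, hj, by omega, by omega, hs⟩
  · rintro ⟨i, h, hi1, hi2, j, hj, hj1, hj2, hs⟩
    have hcc : ∀ x y : ℤ, x + row = (i : ℤ) → y + col = (j : ℤ) →
        checkCell grid (x + row) (y + col) = true := by
      intro x y hx hy
      rw [checkCell_iff]
      exact ⟨i, h, by omega, j, hj, by omega, hs⟩
    have hx3 : (i : ℤ) - row = -1 ∨ (i : ℤ) - row = 0 ∨ (i : ℤ) - row = 1 := by omega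
    have hy3 : (j : ℤ) - col = -1 ∨ (j : ℤ) - col = 0 ∨ (j : ℤ) - col = 1 := by omega
    rcases hx3 with hx | hx | hx <;> rcases hy3 with hy | hy | hy
    · exact Or.inl (Or.inl (hcc _ _ (by omega) (by omega)))
    · exact Or.inl (Or.inr (Or.inl (hcc _ _ (by omega) (by omega))))
    · exact Or.inl (Or.inr (Or.inr (hcc _ _ (by omega) (by omega))))
    · exact Or.inr (Or.inl (Or.inl (hcc _ _ (by omega) (by omega))))
    · exact Or.inr (Or.inl (Or.inr (Or.inl (hcc _ _ (by omega) (by omega)))))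
    · exact Or.inr (Or.inl (Or.inr (Or.inr (hcc _ _ (by omega) (by omega)))))
    · exact Or.inr (Or.inr (Or.inl (hcc _ _ (by omega) (by omega))))
    · exact Or.inr (Or.inr (Or.inr (Or.inl (hcc _ _ (by omega) (by omega)))))
    · exact Or.inr (Or.inr (Or.inr (Or.inr (hcc _ _ (by omega) (by omega)))))

-- ===== VERDICT (by name: the statement is the Claim_ definition above) =====
theorem check_spec : Claim_equal_check := by
  intro grid row col _ hpre
  unfold Spec_check
  rw [Bool.eq_iff_iff, check_iff, check_alt_iff]
  constructor
  · rintro ⟨i, h, h1, h2, j, hj, hj1, hj2, hs⟩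
    have hjl : j < grid[i].length := (hpre i h h1 h2 j (by omega) hj1 hj2).mp hj
    refine ⟨i, h, h1, h2, j, hjl, hj1, hj2, ?_⟩
    rw [PySem.List.pyGet?_ofNat grid[i] j hjl] at hs
    simpa using hs
  · rintro ⟨i, h, h1, h2, j, hjl, hj1, hj2, hs⟩
    refine ⟨i, h, h1, h2, j, (hpre i h h1 h2 j (by omega) hj1 hj2).mpr hjl, hj1, hj2, ?_⟩
    rw [PySem.List.pyGet?_ofNat grid[i] j hjl]
    simpa using hs
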